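-- pv_equiv track=rewrite | github.com/bodongiee/genie_sim_workplace | source/scene_reconstruction/third_party/gsplat/examples/get_noval_view_and_render.py | downsample_poses
-- ===== SOURCE A (Python) =====
-- from typing import List, Dict, Tuple, Optional
--
-- def downsample_poses(
--     poses_c2w: List[Dict],
--     interval: int,
-- ) -> List[Dict]:
--     if interval <= 0:
--         raise ValueError(f"Downsample interval must be greater than 0, got: {interval}")
--
--     if len(poses_c2w) <= 1:
--         return poses_c2w.copy()
--
--     sampled_indices = list(range(0, len(poses_c2w), interval))
--
--     if sampled_indices[-1] != len(poses_c2w) - 1: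
--         sampled_indices.append(len(poses_c2w) - 1)
--
--     sampled_indices = sorted(list(set(sampled_indices)))
--
--     sampled_poses = [poses_c2w[i] for i in sampled_indices]
--
--     return sampled_poses
-- ===== SOURCE B (Python) =====
-- def downsample_poses(poses_c2w, interval):
--     if interval <= 0:
--         raise ValueError(f"Downsample interval must be greater than 0, got: {interval}")
--
--     if len(poses_c2w) <= 1:
--         return poses_c2w.copy()
--
--     # Single streaming pass: a countdown counter decides which poses to keep;
--     # no index lists, no dedup/sort, no index arithmetic at all.
--     out = []
--     skip = 0
--     kept_last = False
--     for pose in poses_c2w: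
--         if skip == 0:
--             out.append(pose)
--             skip = interval
--             kept_last = True
--         else:
--             kept_last = False
--         skip -= 1
--     if not kept_last:
--         out.append(poses_c2w[-1])
--     return out
-- ===== Notes on version B (the rewrite author's own statement) =====
-- stated objective: alternative
-- what changed: Replaces A's build-index-list / conditional-append / set-dedup / sort / gather-by-index pipeline with one streaming pass over the poses driven by a countdown skip counter and a kept-last flag, with no index arithmetic at all.
import Mathlib
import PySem

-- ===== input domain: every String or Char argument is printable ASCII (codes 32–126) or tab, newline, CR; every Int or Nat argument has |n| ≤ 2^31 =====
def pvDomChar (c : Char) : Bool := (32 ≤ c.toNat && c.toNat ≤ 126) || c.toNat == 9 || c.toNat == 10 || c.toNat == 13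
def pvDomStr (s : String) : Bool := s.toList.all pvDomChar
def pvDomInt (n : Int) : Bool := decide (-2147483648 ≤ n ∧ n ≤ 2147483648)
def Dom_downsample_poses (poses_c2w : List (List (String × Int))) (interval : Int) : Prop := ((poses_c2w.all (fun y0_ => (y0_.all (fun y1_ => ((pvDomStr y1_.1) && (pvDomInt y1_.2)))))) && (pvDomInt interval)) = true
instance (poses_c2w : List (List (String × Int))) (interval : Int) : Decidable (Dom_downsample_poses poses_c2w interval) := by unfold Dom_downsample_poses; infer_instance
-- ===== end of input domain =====

-- B replaces A's index-list + dedup + sort + gather pipeline with one streaming pass driven by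
-- a countdown skip counter and a kept-last flag (objective: alternative decomposition).

-- ===== PORT A =====
def downsample_poses (poses_c2w : List (List (String × Int))) (interval : Int) : List (List (String × Int)) :=
  if interval ≤ 0 then []  -- Python raises ValueError here; excluded by Pre_
  else if poses_c2w.length ≤ 1 then poses_c2w
  else
    let sampled_indices := PySem.List.pyRange 0 (poses_c2w.length : Int) interval
    -- sampled_indices[-1]: the list is nonempty here (length ≥ 2, interval ≥ 1), so pyGetD is exact
    let sampled_indices :=
      if PySem.List.pyGetD sampled_indices (-1) 0 ≠ (poses_c2w.length : Int) - 1 then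
        sampled_indices ++ [(poses_c2w.length : Int) - 1]
      else sampled_indices
    let sampled_indices := PySem.List.sorted (PySem.Set.ofList sampled_indices) id
    -- every index is in range, so pyGetD with default [] is exact
    sampled_indices.map (fun i => PySem.List.pyGetD poses_c2w i [])

-- ===== PORT B =====
-- one loop iteration of B: if skip == 0 keep the pose, reset skip, set kept_last; then skip -= 1
def dsStep (interval : Int) (st : List (List (String × Int)) × Int × Bool) (pose : List (String × Int)) : List (List (String × Int)) × Int × Bool :=
  let st' := if st.2.1 = 0 then (st.1 ++ [pose], interval, true) else (st.1, st.2.1, false)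
  (st'.1, st'.2.1 - 1, st'.2.2)

def downsample_poses_alt (poses_c2w : List (List (String × Int))) (interval : Int) : List (List (String × Int)) :=
  if interval ≤ 0 then []  -- Python raises ValueError here; excluded by Pre_
  else if poses_c2w.length ≤ 1 then poses_c2w
  else
    let st := poses_c2w.foldl (dsStep interval) ([], 0, false)
    -- poses_c2w[-1]: list nonempty here, pyGetD exact
    if !st.2.2 then st.1 ++ [PySem.List.pyGetD poses_c2w (-1) []] else st.1

-- ===== PRECONDITION & SPEC =====
-- Pre_ excludes exactly interval ≤ 0, where Python A raises ValueError.
def Pre_downsample_poses (poses_c2w : List (List (String × Int))) (interval : Int) : Prop := 0 < interval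
instance (poses_c2w : List (List (String × Int))) (interval : Int) : Decidable (Pre_downsample_poses poses_c2w interval) := by unfold Pre_downsample_poses; infer_instance
def pvWitness_downsample_poses : (List (List (String × Int))) × Int := ([[("a", 1)], [("b", 2)], [("c", 3)]], 2)
def Spec_downsample_poses (poses_c2w : List (List (String × Int))) (interval : Int) (out : List (List (String × Int))) : Prop := out = downsample_poses_alt poses_c2w interval
instance (poses_c2w : List (List (String × Int))) (interval : Int) (out : List (List (String × Int))) : Decidable (Spec_downsample_poses poses_c2w interval out) := by unfold Spec_downsample_poses; infer_instance

-- ===== CLAIM (what is proved, stated in full; the proofs are below) =====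
def Claim_equal_downsample_poses : Prop := ∀ (poses_c2w : List (List (String × Int))) (interval : Int), Dom_downsample_poses poses_c2w interval → Pre_downsample_poses poses_c2w interval → Spec_downsample_poses poses_c2w interval (downsample_poses poses_c2w interval)

-- ===== LEMMAS AND PROOFS =====

-- proof-only characterisations of B's fold state
def keptOf (d : Nat) (l : List (List (String × Int))) (s : Nat) : List (List (String × Int)) :=
  (List.range l.length).filterMap (fun k => if s ≤ k ∧ d ∣ (k - s) then l[k]? else none)

def tookOf (d : Nat) (l : List (List (String × Int))) (s : Nat) (t0 : Bool) : Bool :=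
  if l = [] then t0 else decide (s ≤ l.length - 1 ∧ d ∣ (l.length - 1 - s))

theorem pv_filterMap_eq_map {α β : Type} {l : List α} {f : α → Option β} {g : α → β}
    (h : ∀ x ∈ l, f x = some (g x)) : l.filterMap f = l.map g := by
  induction l with
  | nil => rfl
  | cons a t ih =>
    simp only [List.filterMap_cons, List.map_cons, h a (by simp)]
    rw [ih (fun x hx => h x (by simp [hx]))]

theorem pv_dvd_shift {d k : Nat} (hd : 1 ≤ d) :
    (d - 1 ≤ k ∧ d ∣ (k - (d - 1))) ↔ d ∣ (k + 1) := by
  constructor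
  · rintro ⟨hle, m, hm⟩
    have h1 : d * (m + 1) = d * m + d := by ring
    exact ⟨m + 1, by omega⟩
  · rintro ⟨m, hm⟩
    rcases m with _ | m'
    · omega
    · have h1 : d * (m' + 1) = d * m' + d := by ring
      exact ⟨by omega, m', by omega⟩

theorem keptOf_cons_zero (d : Nat) (hd : 1 ≤ d) (a : List (String × Int)) (t : List (List (String × Int))) :
    keptOf d (a :: t) 0 = a :: keptOf d t (d - 1) := by
  unfold keptOf
  rw [List.length_cons, List.range_succ_eq_map,
    List.filterMap_cons_some (f := fun k => if 0 ≤ k ∧ d ∣ (k - 0) then (a :: t)[k]? else none)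
      (a := (0:Nat)) (b := a) (by simp),
    List.filterMap_map]
  congr 1
  apply List.filterMap_congr
  intro k _
  simp only [Function.comp, List.getElem?_cons_succ]
  refine if_congr ?_ rfl rfl
  constructor
  · rintro ⟨-, h2⟩
    exact pv_dvd_shift hd |>.mpr (by simpa using h2)
  · intro hx
    exact ⟨Nat.zero_le _, by simpa using (pv_dvd_shift hd).mp hx⟩

theorem keptOf_cons_pos (d : Nat) (s : Nat) (hs : 1 ≤ s) (a : List (String × Int)) (t : List (List (String × Int))) :
    keptOf d (a :: t) s = keptOf d t (s - 1) := by
  unfold keptOf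
  rw [List.length_cons, List.range_succ_eq_map,
    List.filterMap_cons_none (by rw [if_neg (by omega : ¬ ((s:Nat) ≤ 0 ∧ d ∣ (0 - s)))]),
    List.filterMap_map]
  apply List.filterMap_congr
  intro k _
  simp only [Function.comp, List.getElem?_cons_succ]
  refine if_congr ?_ rfl rfl
  have he : k + 1 - s = k - (s - 1) := by omega
  rw [he]
  constructor
  · rintro ⟨h1, h2⟩; exact ⟨by omega, h2⟩
  · rintro ⟨h1, h2⟩; exact ⟨by omega, h2⟩

theorem tookOf_cons_zero (d : Nat) (hd : 1 ≤ d) (a : List (String × Int)) (t : List (List (String × Int))) (t0 : Bool) :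
    tookOf d (a :: t) 0 t0 = tookOf d t (d - 1) true := by
  unfold tookOf
  rcases t with _ | ⟨b, t'⟩
  · simp
  · rw [if_neg (by simp), if_neg (by simp), decide_eq_decide]
    simp only [List.length_cons]
    have he1 : t'.length + 1 + 1 - 1 - 0 = t'.length + 1 := by omega
    have he2 : t'.length + 1 - 1 = t'.length := by omega
    rw [he1, he2]
    constructor
    · rintro ⟨-, h2⟩
      exact (pv_dvd_shift hd).mpr h2
    · intro hx
      exact ⟨Nat.zero_le _, (pv_dvd_shift hd).mp hx⟩

theorem tookOf_cons_pos (d : Nat) (s : Nat) (hs : 1 ≤ s) (a : List (String × Int)) (t : List (List (String × Int))) (t0 : Bool) :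
    tookOf d (a :: t) s t0 = tookOf d t (s - 1) false := by
  unfold tookOf
  rcases t with _ | ⟨b, t'⟩
  · rw [if_neg (by simp), if_pos rfl, decide_eq_false_iff_not]
    rintro ⟨h1, -⟩
    simp at h1
    omega
  · rw [if_neg (by simp), if_neg (by simp), decide_eq_decide]
    simp only [List.length_cons]
    have he : t'.length + 1 + 1 - 1 - s = t'.length + 1 - 1 - (s - 1) := by omega
    rw [he]
    constructor
    · rintro ⟨h1, h2⟩; exact ⟨by omega, h2⟩
    · rintro ⟨h1, h2⟩; exact ⟨by omega, h2⟩

theorem dsStep_run (interval : Int) (hI : 0 < interval) :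
    ∀ (l : List (List (String × Int))) (acc : List (List (String × Int))) (s : Nat), (s : Int) < interval → ∀ t0 : Bool,
      (l.foldl (dsStep interval) (acc, (s : Int), t0)).1 = acc ++ keptOf interval.toNat l s ∧
      (l.foldl (dsStep interval) (acc, (s : Int), t0)).2.2 = tookOf interval.toNat l s t0 := by
  intro l
  induction l with
  | nil => intro acc s hs t0; simp [keptOf, tookOf]
  | cons a t ih =>
    intro acc s hs t0
    have hd : 1 ≤ interval.toNat := by omega
    rcases Nat.eq_zero_or_pos s with hz | hp
    · subst hz
      have hstep : dsStep interval (acc, ((0 : Nat) : Int), t0) a = (acc ++ [a], interval - 1, true) := by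
        simp [dsStep]
      have hcast : interval - 1 = ((interval.toNat - 1 : Nat) : Int) := by omega
      rw [List.foldl_cons, hstep, hcast]
      have hlt : ((interval.toNat - 1 : Nat) : Int) < interval := by omega
      obtain ⟨h1, h2⟩ := ih (acc ++ [a]) (interval.toNat - 1) hlt true
      rw [h1, h2, keptOf_cons_zero _ hd, tookOf_cons_zero _ hd]
      simp
    · have hne : s ≠ 0 := by omega
      have hstep : dsStep interval (acc, ((s : Nat) : Int), t0) a = (acc, (s : Int) - 1, false) := by
        simp [dsStep, hne]
      have hcast : (s : Int) - 1 = ((s - 1 : Nat) : Int) := by omega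
      rw [List.foldl_cons, hstep, hcast]
      obtain ⟨h1, h2⟩ := ih acc (s - 1) (by omega) false
      rw [h1, h2, keptOf_cons_pos _ s hp, tookOf_cons_pos _ s hp]
      exact ⟨rfl, rfl⟩

theorem downsample_main (poses_c2w : List (List (String × Int))) (interval : Int)
    (hpos : 0 < interval) :
    downsample_poses poses_c2w interval = downsample_poses_alt poses_c2w interval := by
  unfold downsample_poses downsample_poses_alt
  have hiv : ¬ (interval ≤ 0) := by omega
  simp only [if_neg hiv]
  by_cases hlen : poses_c2w.length ≤ 1
  · simp only [if_pos hlen]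
  · simp only [if_neg hlen]
    have h2 : 2 ≤ poses_c2w.length := by omega
    set n : Nat := poses_c2w.length with hn
    set d : Nat := interval.toNat with hD
    have hd1 : 1 ≤ d := by omega
    have hdI : (d : Int) = interval := by omega
    set N : Int := (poses_c2w.length : Int) with hN
    have hN2 : 2 ≤ N := by omega
    set c : Nat := ((N + interval - 1) / interval).toNat with hcdef
    -- characterization of c
    have hc : ∀ k : Nat, k < c ↔ interval * (k : Int) < N := by
      intro k
      have hdnn : 0 ≤ (N + interval - 1) / interval := Int.ediv_nonneg (by omega) (by omega)
      have h1 : ((k : Int) < (N + interval - 1) / interval) ↔ ((k : Int) + 1) * interval ≤ N + interval - 1 := by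
        constructor
        · intro h; exact (Int.le_ediv_iff_mul_le hpos).mp (by omega)
        · intro h; have := (Int.le_ediv_iff_mul_le hpos).mpr h; omega
      constructor
      · intro hk
        have hk' : (k : Int) < (N + interval - 1) / interval := by omega
        have := h1.mp hk'; nlinarith
      · intro hk
        have h' : ((k : Int) + 1) * interval ≤ N + interval - 1 := by nlinarith
        have := h1.mpr h'
        omega
    have hcN : ∀ k : Nat, k < c ↔ d * k < n := by
      intro k
      rw [hc k]
      constructor
      · intro h
        have : ((d * k : Nat) : Int) < N := by push_cast; rw [hdI]; exact h
        omega
      · intro h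
        have : ((d * k : Nat) : Int) < (n : Int) := by exact_mod_cast h
        rw [show ((d * k : Nat) : Int) = interval * (k : Int) by push_cast; rw [hdI]] at this
        exact this
    have hc0 : 0 < c := by rw [hc 0]; push_cast; omega
    -- A side: range form
    have hrange : PySem.List.pyRange 0 N interval
        = (List.range c).map (fun (k : Nat) => interval * (k : Int)) := by
      rw [PySem.List.pyRange_of_pos _ _ hpos, if_pos (by omega : (0:Int) < N)]
      simp only [zero_add, sub_zero]
      rw [← hcdef]
    have hlen' : ((List.range c).map (fun (k : Nat) => interval * (k : Int))).length = c := by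
      rw [List.length_map, List.length_range]
    have hlast0 : ((List.range c).map (fun (k : Nat) => interval * (k : Int))) ≠ [] := by
      intro h; rw [h] at hlen'; simp only [List.length_nil] at hlen'; omega
    have hlastval : ((List.range c).map (fun (k : Nat) => interval * (k : Int))).getLast hlast0
        = interval * ((c : Int) - 1) := by
      rw [List.getLast_eq_getElem]
      simp only [hlen', List.getElem_map, List.getElem_range]
      congr 1
      omega
    have hget : PySem.List.pyGetD ((List.range c).map (fun (k : Nat) => interval * (k : Int))) (-1) 0
        = interval * ((c : Int) - 1) := by
      rw [PySem.List.pyGetD_neg_one _ _ hlast0, hlastval]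
    -- divisibility characterization of A's append condition
    have hdvd : interval * ((c : Int) - 1) = N - 1 ↔ interval ∣ (N - 1) := by
      constructor
      · intro h; exact ⟨(c : Int) - 1, h.symm⟩
      · rintro ⟨q, hq⟩
        have hq0 : 0 ≤ q := by nlinarith
        have hql : q.toNat < c := by
          rw [hc]; rw [Int.toNat_of_nonneg hq0]; omega
        have hqu : ¬ (q.toNat + 1 < c) := by
          rw [hc]
          push Not
          push_cast
          rw [Int.toNat_of_nonneg hq0]
          nlinarith
        have hce : c = q.toNat + 1 := by omega
        rw [hce]
        push_cast
        rw [Int.toNat_of_nonneg hq0]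
        have hq1 : (q:Int) + 1 - 1 = q := by ring
        rw [hq1]
        exact hq.symm
    -- B side: characterize the fold
    have hrun := dsStep_run interval hpos poses_c2w [] 0 (by omega) false
    rw [Nat.cast_zero] at hrun
    obtain ⟨hout, htook⟩ := hrun
    -- keptOf poses 0 = stride gather
    have hkept : keptOf d poses_c2w 0
        = (List.range c).map (fun (k : Nat) => PySem.List.pyGetD poses_c2w (interval * (k : Int)) []) := by
      unfold keptOf
      rw [← hn]
      have hfm : (List.range n).filterMap
            (fun k => if 0 ≤ k ∧ d ∣ (k - 0) then poses_c2w[k]? else none)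
          = ((List.range n).filter (fun k => decide (d ∣ k))).filterMap (fun k => poses_c2w[k]?) := by
        rw [List.filterMap_filter]
        apply List.filterMap_congr
        intro k _
        by_cases hk : d ∣ k
        · simp [hk]
        · simp [hk]
      have hfilter : (List.range n).filter (fun k => decide (d ∣ k))
          = (List.range c).map (fun m => d * m) := by
        have hnd1 : ((List.range n).filter (fun k => decide (d ∣ k))).Nodup :=
          (List.nodup_range).filter _
        have hnd2 : ((List.range c).map (fun m => d * m)).Nodup := by
          refine (List.nodup_range).map ?_
          intro a b hab
          exact Nat.eq_of_mul_eq_mul_left (by omega) hab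
        have hmem : ∀ k, k ∈ (List.range n).filter (fun k => decide (d ∣ k))
            ↔ k ∈ (List.range c).map (fun m => d * m) := by
          intro k
          simp only [List.mem_filter, List.mem_range, List.mem_map, decide_eq_true_eq]
          constructor
          · rintro ⟨hkn, m, hm⟩
            exact ⟨m, (hcN m).mpr (by omega), by omega⟩
          · rintro ⟨m, hm, rfl⟩
            exact ⟨(hcN m).mp hm, ⟨m, rfl⟩⟩
        have hperm : List.Perm ((List.range n).filter (fun k => decide (d ∣ k)))
            ((List.range c).map (fun m => d * m)) :=
          (List.perm_ext_iff_of_nodup hnd1 hnd2).mpr hmem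
        have hs1 : List.Pairwise (· ≤ ·) ((List.range n).filter (fun k => decide (d ∣ k))) :=
          List.Pairwise.sublist List.filter_sublist List.pairwise_le_range
        have hs2 : List.Pairwise (· ≤ ·) ((List.range c).map (fun m => d * m)) := by
          refine List.Pairwise.map _ ?_ List.pairwise_le_range
          intro a b hab
          exact Nat.mul_le_mul_left d hab
        exact List.Perm.eq_of_pairwise (fun a b _ _ h1 h2 => Nat.le_antisymm h1 h2) hs1 hs2 hperm
      rw [hfm, hfilter, List.filterMap_map]
      apply pv_filterMap_eq_map
      intro m hm
      rw [List.mem_range] at hm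
      have hlt : d * m < n := (hcN m).mp hm
      have hInt : (interval * (m : Int)) = ((d * m : Nat) : Int) := by push_cast; rw [hdI]
      simp only [Function.comp]
      rw [hInt, PySem.List.pyGetD_eq_getElem _ _ (by positivity) (by exact_mod_cast hlt),
        List.getElem?_eq_getElem (by omega)]
      congr 1
    -- took characterization
    have hnil : poses_c2w ≠ [] := by
      intro h
      rw [h] at hn
      simp at hn
      omega
    have htookval : tookOf d poses_c2w 0 false = decide (d ∣ (n - 1)) := by
      unfold tookOf
      rw [if_neg hnil, ← hn]
      simp
    -- the two branch conditions agree
    have hcond : (interval * ((c:Int) - 1) ≠ N - 1) ↔ ¬ d ∣ (n - 1) := by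
      rw [not_iff_not, hdvd]
      rw [show N - 1 = ((n - 1 : Nat) : Int) by omega, ← hdI]
      exact_mod_cast (Int.natCast_dvd_natCast (m := d) (n := n - 1)).symm
    -- sortedness of A's index list
    have hpair0 : List.Pairwise (· < ·) ((List.range c).map (fun (k : Nat) => interval * (k : Int))) := by
      refine List.Pairwise.map _ ?_ List.pairwise_lt_range
      intro a b hab
      have : (a : Int) < (b : Int) := by exact_mod_cast hab
      nlinarith
    have hsorted_of_pair : ∀ (L : List Int), List.Pairwise (· < ·) L →
        PySem.List.sorted (PySem.Set.ofList L) id = L := by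
      intro L hp
      have hnd : L.Nodup := hp.imp (fun h => ne_of_lt h)
      rw [PySem.Set.ofList_eq_self_of_nodup L hnd]
      exact PySem.List.sorted_eq_of_perm_of_pairwise_lt L L id (List.Perm.refl L) hp
    rw [hrange, hget, hout, htook, ← hD, htookval, hkept]
    simp only [List.nil_append]
    by_cases hd : d ∣ (n - 1)
    · -- last sampled index is already n-1: no append on either side
      rw [if_neg (by simpa using (not_not.mpr ((hcond.not_right).mpr (not_not.mpr hd)))),
        if_neg (by simp [hd])]
      rw [hsorted_of_pair _ hpair0, List.map_map]
      rfl
    · -- append the last pose on both sides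
      have hne : interval * ((c:Int) - 1) ≠ N - 1 := hcond.mpr hd
      rw [if_pos hne, if_pos (by simp [hd])]
      have hpair : List.Pairwise (· < ·)
          (((List.range c).map (fun (k : Nat) => interval * (k : Int))) ++ [N - 1]) := by
        rw [List.pairwise_append]
        refine ⟨hpair0, List.pairwise_singleton _ _, ?_⟩
        intro a ha b hb
        rw [List.mem_singleton] at hb
        subst hb
        rw [List.mem_map] at ha
        obtain ⟨k, hk, rfl⟩ := ha
        rw [List.mem_range] at hk
        have hlt : interval * (k : Int) < N := (hc k).mp hk
        have : interval * (k : Int) ≠ N - 1 := by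
          intro h
          exact hne (by
            have hkc : k < c := hk
            have hkc' : k = c - 1 := by
              by_contra hkne
              have hklt : k < c - 1 := by omega
              have := (hc (k+1)).mp (by omega)
              push_cast at this
              nlinarith
            rw [← h, hkc']
            congr 1
            omega)
        omega
      rw [hsorted_of_pair _ hpair, List.map_append, List.map_map]
      have hlastelt : PySem.List.pyGetD poses_c2w (-1) [] = PySem.List.pyGetD poses_c2w (N - 1) [] := by
        rw [PySem.List.pyGetD_neg_one _ _ hnil,
            PySem.List.pyGetD_eq_getElem _ _ (by omega : (0:Int) ≤ N - 1) (by omega : N - 1 < (poses_c2w.length:Int))]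
        rw [List.getLast_eq_getElem]
        congr 1
        omega
      rw [List.map_singleton, hlastelt]
      rfl

-- ===== VERDICT (by name: the statement is the Claim_ definition above) =====
theorem downsample_poses_spec : Claim_equal_downsample_poses := by
  intro poses interval _ hpre
  unfold Spec_downsample_poses
  exact downsample_main poses interval hpre
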